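-- pv_equiv track=rewrite | github.com/BillionairePhu/leetcode-problems | ProblemSet_25xx/Problem_2592/solution.py | maximizeGreatness
-- ===== SOURCE A (Python) =====
-- from typing import List
--
-- def maximizeGreatness(nums: List[int]) -> int:
--     nums.sort()
--     small_index, large_index = 0, 0
--     result = 0
--
--     while large_index < len(nums):
--         if (nums[large_index] > nums[small_index]):
--             small_index += 1
--             result += 1
--         large_index += 1
--     return result
-- ===== SOURCE B (Python) =====
-- def maximizeGreatness(nums):
--     # Sorts nums in place (same side effect as A); answer = n - longest equal run.
--     nums.sort()
--     best = 0
--     run = 0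
--     prev = None
--     for x in nums:
--         run = run + 1 if x == prev else 1
--         if run > best:
--             best = run
--         prev = x
--     return len(nums) - best
-- ===== Notes on version B (the rewrite author's own statement) =====
-- stated objective: alternative
-- what changed: Replaces the two-pointer greedy matching pass over the sorted array by a closed form: the answer equals n minus the length of the longest run of equal values in the sorted array, computed by a single run-length scan.
import Mathlib
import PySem

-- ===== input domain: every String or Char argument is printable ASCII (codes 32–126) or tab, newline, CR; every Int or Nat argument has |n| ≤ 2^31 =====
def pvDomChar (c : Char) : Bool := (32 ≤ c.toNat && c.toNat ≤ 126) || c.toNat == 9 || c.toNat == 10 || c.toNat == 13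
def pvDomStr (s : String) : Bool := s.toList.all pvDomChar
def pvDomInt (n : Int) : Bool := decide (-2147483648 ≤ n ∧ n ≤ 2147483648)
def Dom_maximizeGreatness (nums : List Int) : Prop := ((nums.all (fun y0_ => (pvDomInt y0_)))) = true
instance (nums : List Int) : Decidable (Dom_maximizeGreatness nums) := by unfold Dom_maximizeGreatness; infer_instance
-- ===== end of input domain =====

-- B replaces A's two-pointer greedy with n minus the longest equal run of the sorted list;
-- both versions sort in place in Python (return-value equivalence is what is proved here).

-- ===== PORT A =====
-- while loop of A; both indices are always in range (0 ≤ small ≤ large < len), so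
-- nums[i] is ported exactly as getD i 0.
def maximizeGreatnessGo (s : List Int) (small large result : Nat) : Int :=
  if large < s.length then
    if s.getD small 0 < s.getD large 0 then
      maximizeGreatnessGo s (small + 1) (large + 1) (result + 1)
    else
      maximizeGreatnessGo s small (large + 1) result
  else
    (result : Int)
termination_by s.length - large
decreasing_by all_goals omega

def maximizeGreatness (nums : List Int) : Int :=
  let s := PySem.List.sorted nums (fun x => x) false
  maximizeGreatnessGo s 0 0 0

-- ===== PORT B =====
-- run-length scan of the sorted list: best = longest equal run so far, run = current run,
-- prev = previous element (None before the first).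
def maximizeGreatnessAltGo (s : List Int) (best run : Nat) (prev : Option Int) : Nat :=
  match s with
  | [] => best
  | x :: t =>
      let run' := if some x = prev then run + 1 else 1
      maximizeGreatnessAltGo t (if run' > best then run' else best) run' (some x)

def maximizeGreatness_alt (nums : List Int) : Int :=
  let s := PySem.List.sorted nums (fun x => x) false
  (s.length : Int) - (maximizeGreatnessAltGo s 0 0 none : Int)

-- ===== PRECONDITION & SPEC =====
def Spec_maximizeGreatness (nums : List Int) (out : Int) : Prop := out = maximizeGreatness_alt nums
instance (nums : List Int) (out : Int) : Decidable (Spec_maximizeGreatness nums out) := by unfold Spec_maximizeGreatness; infer_instance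

-- ===== CLAIM (what is proved, stated in full; the proofs are below) =====
def Claim_equal_maximizeGreatness : Prop := ∀ (nums : List Int), Dom_maximizeGreatness nums → Spec_maximizeGreatness nums (maximizeGreatness nums)

-- ===== LEMMAS AND PROOFS =====

lemma pv_drop_cons (s : List Int) (k : Nat) (h : k < s.length) :
    s.drop k = s.getD k 0 :: s.drop (k + 1) := by
  rw [List.getD_eq_getElem s 0 h]
  exact List.drop_eq_getElem_cons h

-- Lockstep invariant: running A's loop from position `large` with small = large - best
-- equals result + (final small) - (current small), where the final small is
-- s.length - (final best) computed by B's scan on the remaining suffix.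
lemma pv_key (s : List Int)
    (hmono : ∀ p q : Nat, p ≤ q → q < s.length → s.getD p 0 ≤ s.getD q 0)
    (large best run : Nat) (prev : Option Int) (result : Nat)
    (hlar : large ≤ s.length)
    (hbest : best ≤ large)
    (hrun : run ≤ best)
    (hz : large = 0 → run = 0 ∧ best = 0 ∧ prev = none)
    (hprev : 0 < large → prev = some (s.getD (large - 1) 0) ∧ 1 ≤ run)
    (hrunall : ∀ j : Nat, large - run ≤ j → j < large → s.getD j 0 = s.getD (large - 1) 0)
    (hrunmax : run < large → s.getD (large - run - 1) 0 < s.getD (large - run) 0) :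
    maximizeGreatnessGo s (large - best) large result
      = (result : Int)
        + (((s.length : Int) - (maximizeGreatnessAltGo (s.drop large) best run prev : Nat))
            - ((large - best : Nat) : Int)) := by
  by_cases hl : large < s.length
  · rw [pv_drop_cons s large hl]
    rw [maximizeGreatnessGo]
    simp only [hl, if_pos]
    rcases Nat.eq_zero_or_pos large with h0 | hpos
    · -- large = 0: small = large, comparison false; run' = 1, best' = 1
      obtain ⟨hr0, hb0, hp0⟩ := hz h0
      subst h0 hr0 hb0 hp0
      have hcmp : ¬ s.getD 0 0 < s.getD 0 0 := lt_irrefl _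
      simp only [Nat.sub_zero, hcmp, if_neg, not_false_iff]
      rw [maximizeGreatnessAltGo]
      simp only [Option.some_ne_none, if_neg, not_false_iff, gt_iff_lt, Nat.lt_succ_iff]
      have := pv_key s hmono 1 1 1 (some (s.getD 0 0)) result
        (by omega) (by omega) (by omega) (by omega)
        (fun _ => ⟨by simp, le_refl 1⟩)
        (fun j hj1 hj2 => by interval_cases j; rfl)
        (fun h => by omega)
      simpa using this
    · -- large > 0
      obtain ⟨hpeq, hrge1⟩ := hprev hpos
      set x := s.getD large 0 with hx
      have hxprev : s.getD (large - 1) 0 ≤ x :=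
        hmono (large - 1) large (by omega) hl
      by_cases heq : x = s.getD (large - 1) 0
      · -- equal to previous: run extends
        have hsome : (some x = prev) = True := by
          simp [hpeq, heq]
        by_cases hrb : run = best
        · -- run' = best + 1 > best: best grows, A does not match
          have hpx : s.getD (large - best) 0 = x := by
            rw [heq]
            exact hrunall (large - best) (by omega) (by omega)
          have hcmp : ¬ s.getD (large - best) 0 < x := by rw [hpx]; exact lt_irrefl _
          simp only [hcmp, if_neg, not_false_iff]
          rw [maximizeGreatnessAltGo]
          simp only [hsome, if_true, gt_iff_lt]
          have hite : (if best < run + 1 then run + 1 else best) = run + 1 := by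
            rw [if_pos]; omega
          rw [hite]
          have := pv_key s hmono (large + 1) (run + 1) (run + 1) (some x) result
            (by omega) (by omega) (le_refl _) (by omega)
            (fun _ => ⟨by simp only [Nat.add_sub_cancel]; exact congrArg some hx, by omega⟩)
            (fun j hj1 hj2 => by
              rcases Nat.lt_or_ge j large with hj | hj
              · have := hrunall j (by omega) hj
                simp only [Nat.add_sub_cancel]
                rw [this, ← heq]
              · have : j = large := by omega
                simp [this])
            (fun h => by
              have := hrunmax (by omega)
              have e1 : large + 1 - (run + 1) - 1 = large - run - 1 := by omega
              have e2 : large + 1 - (run + 1) = large - run := by omega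
              rw [e1, e2]; exact this)
          have hcast : large - best = large + 1 - (run + 1) := by omega
          rw [hcast, this]
        · -- run < best: best stays, A matches
          have hrlt : run < best := lt_of_le_of_ne hrun hrb
          have hrltlar : run < large := by omega
          have hstep : s.getD (large - run - 1) 0 < s.getD (large - run) 0 :=
            hrunmax hrltlar
          have hmono1 : s.getD (large - best) 0 ≤ s.getD (large - run - 1) 0 :=
            hmono _ _ (by omega) (by omega)
          have hrunv : s.getD (large - run) 0 = s.getD (large - 1) 0 :=
            hrunall (large - run) (le_refl _) (by omega)
          have hcmp : s.getD (large - best) 0 < x := by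
            calc s.getD (large - best) 0 ≤ s.getD (large - run - 1) 0 := hmono1
              _ < s.getD (large - run) 0 := hstep
              _ = s.getD (large - 1) 0 := hrunv
              _ = x := heq.symm
          simp only [hcmp, if_pos]
          rw [maximizeGreatnessAltGo]
          simp only [hsome, if_true, gt_iff_lt]
          have hngt : ¬ (best < run + 1) := by omega
          rw [if_neg hngt]
          have := pv_key s hmono (large + 1) best (run + 1) (some x) (result + 1)
            (by omega) (by omega) (by omega) (by omega)
            (fun _ => ⟨by simp only [Nat.add_sub_cancel]; exact congrArg some hx, by omega⟩)
            (fun j hj1 hj2 => by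
              rcases Nat.lt_or_ge j large with hj | hj
              · have := hrunall j (by omega) hj
                simp only [Nat.add_sub_cancel]
                rw [this, ← heq]
              · have : j = large := by omega
                simp [this])
            (fun h => by
              have := hrunmax (by omega)
              have e1 : large + 1 - (run + 1) - 1 = large - run - 1 := by omega
              have e2 : large + 1 - (run + 1) = large - run := by omega
              rw [e1, e2]; exact this)
          have hcast : large - best + 1 = large + 1 - best := by omega
          rw [hcast, this]
          push_cast
          have : (large + 1 - best : Nat) = (large : Int) + 1 - best := by
            push_cast [Nat.cast_sub (by omega : best ≤ large + 1)]; ring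
          rw [this]
          have : ((large - best : Nat) : Int) = (large : Int) - best := by
            push_cast [Nat.cast_sub hbest]; ring
          rw [this]; ring
      · -- strictly larger than previous: run resets to 1
        have hlt : s.getD (large - 1) 0 < x := lt_of_le_of_ne hxprev (Ne.symm heq)
        have hnsome : ¬ (some x = prev) := by
          rw [hpeq]
          simp only [Option.some.injEq]
          exact heq
        have hbge1 : 1 ≤ best := le_trans hrge1 hrun
        have hcmp : s.getD (large - best) 0 < x := by
          calc s.getD (large - best) 0 ≤ s.getD (large - 1) 0 :=
                hmono _ _ (by omega) (by omega)
            _ < x := hlt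
        simp only [hcmp, if_pos]
        rw [maximizeGreatnessAltGo]
        simp only [hnsome, if_neg, not_false_iff, gt_iff_lt]
        have hngt : ¬ (best < 1) := by omega
        simp only [hngt, if_neg, not_false_iff]
        have := pv_key s hmono (large + 1) best 1 (some x) (result + 1)
          (by omega) (by omega) (by omega) (by omega)
          (fun _ => ⟨by simp only [Nat.add_sub_cancel]; exact congrArg some hx, le_refl 1⟩)
          (fun j hj1 hj2 => by
            have : j = large := by omega
            simp [this])
          (fun h => by
            have e1 : large + 1 - 1 - 1 = large - 1 := by omega
            have e2 : large + 1 - 1 = large := by omega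
            rw [e1, e2]; exact hlt)
        have hcast : large - best + 1 = large + 1 - best := by omega
        rw [hcast, this]
        push_cast
        have h1 : (large + 1 - best : Nat) = (large : Int) + 1 - best := by
          push_cast [Nat.cast_sub (by omega : best ≤ large + 1)]; ring
        have h2 : ((large - best : Nat) : Int) = (large : Int) - best := by
          push_cast [Nat.cast_sub hbest]; ring
        rw [h1, h2]; ring
  · -- large = s.length: both loops finished
    have hle : large = s.length := by omega
    rw [maximizeGreatnessGo]
    simp only [hl, if_neg, not_false_iff]
    rw [hle, List.drop_length, maximizeGreatnessAltGo]
    have : ((s.length - best : Nat) : Int) = (s.length : Int) - best := by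
      push_cast [Nat.cast_sub (hle ▸ hbest)]; ring
    rw [this]; ring
termination_by s.length - large
decreasing_by all_goals omega

-- ===== VERDICT (by name: the statement is the Claim_ definition above) =====
theorem maximizeGreatness_spec : Claim_equal_maximizeGreatness := by
  intro nums _
  unfold Spec_maximizeGreatness maximizeGreatness maximizeGreatness_alt
  set s := PySem.List.sorted nums (fun x => x) false with hs
  have hmono : ∀ p q : Nat, p ≤ q → q < s.length → s.getD p 0 ≤ s.getD q 0 := by
    intro p q hpq hq
    rw [List.getD_eq_getElem s 0 (by omega), List.getD_eq_getElem s 0 hq]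
    exact PySem.List.sorted_id_getElem_mono nums hpq hq
  have := pv_key s hmono 0 0 0 none 0
    (by omega) (le_refl 0) (le_refl 0) (fun _ => ⟨rfl, rfl, rfl⟩)
    (fun h => absurd h (by omega))
    (fun j hj1 hj2 => absurd hj2 (by omega))
    (fun h => absurd h (by omega))
  simpa using this
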